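-- pv_equiv track=rewrite | github.com/vwarlet/desafio-tempo-medio-entre-picos | main.py | encontrar_picos_verdadeiros
-- ===== SOURCE A (Python) =====
-- def encontrar_picos_verdadeiros(valores, distancia):
--     picos_verdadeiros = []
--     for i in range(1, len(valores) - 1):
--         # Considerar apenas valores entre 0 e 100
--         if valores[i] < 0 or valores[i] > 100:
--             pass
--         if valores[i] >= 50 and valores[i] > valores[i - 1] and valores[i] > valores[i + 1]:
--             pico_verdadeiro = True
--             # Verifica se o pico é válido comparando com os vizinhos dentro da distância especificada
--             for j in range(1, distancia + 1):
--                 if i - j >= 0: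
--                     if valores[i] <= valores[i - j]:
--                         pico_verdadeiro = False
--                         break
--                 if i + j < len(valores):
--                     if valores[i] <= valores[i + j]:
--                         pico_verdadeiro = False
--                         break
--             if pico_verdadeiro:
--                 picos_verdadeiros.append((i, valores[i]))
--     return picos_verdadeiros
-- ===== SOURCE B (Python) =====
-- def encontrar_picos_verdadeiros(valores, distancia):
--     n = len(valores)
--     raio = max(distancia, 1)
--     # prev_ge[i]: nearest index j < i with valores[j] >= valores[i] (-1 if none)
--     prev_ge = []
--     stack = []
--     for i in range(n):
--         while stack and valores[stack[-1]] < valores[i]: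
--             stack.pop()
--         prev_ge.append(stack[-1] if stack else -1)
--         stack.append(i)
--     # next_ge[i]: nearest index j > i with valores[j] >= valores[i] (n if none)
--     next_ge = []
--     stack = []
--     for i in range(n - 1, -1, -1):
--         while stack and valores[stack[-1]] < valores[i]:
--             stack.pop()
--         next_ge.append(stack[-1] if stack else n)
--         stack.append(i)
--     next_ge.reverse()
--     return [(i, valores[i]) for i in range(1, n - 1)
--             if valores[i] >= 50
--             and prev_ge[i] < max(0, i - raio)
--             and min(n - 1, i + raio) < next_ge[i]]
-- ===== Notes on version B (the rewrite author's own statement) =====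
-- stated objective: faster
-- what changed: B replaces A's per-candidate rescan of the whole distance window (nested loop with flag/break, O(n*d)) by two monotonic-stack passes that compute each index's nearest >=-valued neighbour on the left and on the right, after which each peak test is an O(1) comparison of those two indices against the unified window radius max(distancia,1).
import Mathlib
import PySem

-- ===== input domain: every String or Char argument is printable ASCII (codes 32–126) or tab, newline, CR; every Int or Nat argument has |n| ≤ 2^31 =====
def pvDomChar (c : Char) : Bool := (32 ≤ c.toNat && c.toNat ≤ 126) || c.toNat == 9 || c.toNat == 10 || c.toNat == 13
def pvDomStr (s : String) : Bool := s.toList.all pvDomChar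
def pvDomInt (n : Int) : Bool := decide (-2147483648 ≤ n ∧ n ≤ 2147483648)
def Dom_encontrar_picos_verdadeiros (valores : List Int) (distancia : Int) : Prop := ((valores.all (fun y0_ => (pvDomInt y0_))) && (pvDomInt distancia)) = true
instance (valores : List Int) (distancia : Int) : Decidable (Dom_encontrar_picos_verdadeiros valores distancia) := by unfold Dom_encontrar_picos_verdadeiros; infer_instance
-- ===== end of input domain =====

-- B replaces A's per-index window rescan (nested loop, O(n*d)) by two monotonic-stack
-- passes computing each index's nearest >=-neighbour on both sides, then one filtering pass (O(n)).

-- ===== PORT A =====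
-- A's inner loop 'for j in range(1, distancia+1): … break' (break = early false)
def pvInnerA (valores : List Int) (n i vi : Int) : List Int → Bool
  | [] => true
  | j :: js =>
    if 0 ≤ i - j ∧ vi ≤ PySem.List.pyGetD valores (i - j) 0 then false
    else if i + j < n ∧ vi ≤ PySem.List.pyGetD valores (i + j) 0 then false
    else pvInnerA valores n i vi js

def encontrar_picos_verdadeiros (valores : List Int) (distancia : Int) : List (Int × Int) :=
  -- A's 'if valores[i] < 0 or valores[i] > 100: pass' does nothing and is omitted;
  -- all index accesses are in range for i in range(1, len-1), so pyGetD's default is never used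
  (PySem.List.pyRange 1 ((valores.length : Int) - 1) 1).foldl
    (fun acc i =>
      let vi := PySem.List.pyGetD valores i 0
      if 50 ≤ vi ∧ PySem.List.pyGetD valores (i - 1) 0 < vi ∧ PySem.List.pyGetD valores (i + 1) 0 < vi then
        if pvInnerA valores (valores.length : Int) i vi (PySem.List.pyRange 1 (distancia + 1) 1) then
          acc ++ [(i, vi)]
        else acc
      else acc) []

-- ===== B-side helpers: monotonic stack =====
-- 'while stack and valores[stack[-1]] < vi: stack.pop()' (stack top = list head)
def pvPop (valores : List Int) (vi : Int) : List Int → List Int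
  | [] => []
  | t :: s => if PySem.List.pyGetD valores t 0 < vi then pvPop valores vi s else t :: s

-- 'stack[-1] if stack else dflt'
def pvTopD : List Int → Int → Int
  | [], dflt => dflt
  | t :: _, _ => t

-- one iteration of the prev_ge loop: state = (prev_ge, stack)
def pvStepL (valores : List Int) (st : List Int × List Int) (i : Int) : List Int × List Int :=
  let s := pvPop valores (PySem.List.pyGetD valores i 0) st.2
  (st.1 ++ [pvTopD s (-1)], i :: s)

-- one iteration of the next_ge loop (default n instead of -1)
def pvStepR (valores : List Int) (st : List Int × List Int) (i : Int) : List Int × List Int :=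
  let s := pvPop valores (PySem.List.pyGetD valores i 0) st.2
  (st.1 ++ [pvTopD s (valores.length : Int)], i :: s)

def pvPrevGE (valores : List Int) : List Int :=
  ((PySem.List.pyRange 0 (valores.length : Int) 1).foldl (pvStepL valores) ([], [])).1

def pvNextGE (valores : List Int) : List Int :=
  (((PySem.List.pyRange ((valores.length : Int) - 1) (-1) (-1)).foldl (pvStepR valores) ([], [])).1).reverse

def encontrar_picos_verdadeiros_alt (valores : List Int) (distancia : Int) : List (Int × Int) :=
  (PySem.List.pyRange 1 ((valores.length : Int) - 1) 1).filterMap (fun i =>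
    if 50 ≤ PySem.List.pyGetD valores i 0 ∧
       PySem.List.pyGetD (pvPrevGE valores) i 0 < max 0 (i - max distancia 1) ∧
       min ((valores.length : Int) - 1) (i + max distancia 1) < PySem.List.pyGetD (pvNextGE valores) i 0
    then some (i, PySem.List.pyGetD valores i 0) else none)

-- ===== PRECONDITION & SPEC =====
def Spec_encontrar_picos_verdadeiros (valores : List Int) (distancia : Int) (out : List (Int × Int)) : Prop := out = encontrar_picos_verdadeiros_alt valores distancia
instance (valores : List Int) (distancia : Int) (out : List (Int × Int)) : Decidable (Spec_encontrar_picos_verdadeiros valores distancia out) := by unfold Spec_encontrar_picos_verdadeiros; infer_instance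

-- ===== CLAIM (what is proved, stated in full; the proofs are below) =====
def Claim_equal_encontrar_picos_verdadeiros : Prop := ∀ (valores : List Int) (distancia : Int), Dom_encontrar_picos_verdadeiros valores distancia → Spec_encontrar_picos_verdadeiros valores distancia (encontrar_picos_verdadeiros valores distancia)

-- ===== LEMMAS AND PROOFS =====

def pvWin (valores : List Int) (d i : Int) : Prop :=
  ∀ j : Int, 1 ≤ j → j ≤ max d 1 →
    (0 ≤ i - j → PySem.List.pyGetD valores (i - j) 0 < PySem.List.pyGetD valores i 0) ∧
    (i + j < (valores.length : Int) → PySem.List.pyGetD valores (i + j) 0 < PySem.List.pyGetD valores i 0)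

-- A's inner loop as a universally quantified condition over its range
lemma pvInnerA_eq_all (valores : List Int) (n i vi : Int) (js : List Int) :
    pvInnerA valores n i vi js = true ↔
    ∀ j ∈ js, (0 ≤ i - j → PySem.List.pyGetD valores (i - j) 0 < vi) ∧
              (i + j < n → PySem.List.pyGetD valores (i + j) 0 < vi) := by
  induction js with
  | nil => simp [pvInnerA]
  | cons j js ih =>
    simp only [pvInnerA, List.mem_cons]
    split_ifs with h1 h2
    · constructor
      · intro h; exact absurd h (by simp)
      · intro h; exact absurd ((h j (Or.inl rfl)).1 h1.1) (by omega)
    · constructor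
      · intro h; exact absurd h (by simp)
      · intro h; exact absurd ((h j (Or.inl rfl)).2 h2.1) (by omega)
    · rw [ih]
      constructor
      · intro h k hk
        rcases hk with rfl | hk
        · exact ⟨fun hg => by omega, fun hg => by omega⟩
        · exact h k hk
      · intro h k hk; exact h k (Or.inr hk)

lemma pvA_elem (valores : List Int) (d i : Int) (h1 : 1 ≤ i) (h2 : i < (valores.length : Int) - 1) :
    ((50 ≤ PySem.List.pyGetD valores i 0 ∧
      PySem.List.pyGetD valores (i - 1) 0 < PySem.List.pyGetD valores i 0 ∧
      PySem.List.pyGetD valores (i + 1) 0 < PySem.List.pyGetD valores i 0) ∧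
     pvInnerA valores (valores.length : Int) i (PySem.List.pyGetD valores i 0)
       (PySem.List.pyRange 1 (d + 1) 1) = true) ↔
    (50 ≤ PySem.List.pyGetD valores i 0 ∧ pvWin valores d i) := by
  rw [pvInnerA_eq_all]
  constructor
  · rintro ⟨⟨h50, hl, hr⟩, hall⟩
    refine ⟨h50, fun j hj1 hjD => ?_⟩
    by_cases hd : 1 ≤ d
    · exact hall j (PySem.List.mem_pyRange_one.2 ⟨hj1, by omega⟩)
    · have hj : j = 1 := by omega
      subst hj
      exact ⟨fun _ => hl, fun _ => hr⟩
  · rintro ⟨h50, hw⟩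
    refine ⟨⟨h50, (hw 1 le_rfl (by omega)).1 (by omega), (hw 1 le_rfl (by omega)).2 (by omega)⟩, ?_⟩
    intro j hj
    rw [PySem.List.mem_pyRange_one] at hj
    exact hw j hj.1 (by omega)

-- A's foldl with accumulator, as append of a filterMap
lemma pvA_filterMap_aux (valores : List Int) (d : Int) (l : List Int) :
    ∀ acc : List (Int × Int),
      l.foldl (fun acc i =>
        let vi := PySem.List.pyGetD valores i 0
        if 50 ≤ vi ∧ PySem.List.pyGetD valores (i - 1) 0 < vi ∧ PySem.List.pyGetD valores (i + 1) 0 < vi then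
          if pvInnerA valores (valores.length : Int) i vi (PySem.List.pyRange 1 (d + 1) 1) then
            acc ++ [(i, vi)]
          else acc
        else acc) acc
      = acc ++ l.filterMap (fun i =>
          if (50 ≤ PySem.List.pyGetD valores i 0 ∧
              PySem.List.pyGetD valores (i - 1) 0 < PySem.List.pyGetD valores i 0 ∧
              PySem.List.pyGetD valores (i + 1) 0 < PySem.List.pyGetD valores i 0) ∧
             pvInnerA valores (valores.length : Int) i (PySem.List.pyGetD valores i 0)
               (PySem.List.pyRange 1 (d + 1) 1) = true
          then some (i, PySem.List.pyGetD valores i 0) else none) := by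
  induction l with
  | nil => intro acc; simp
  | cons i l ih =>
    intro acc
    rw [List.foldl_cons, List.filterMap_cons, ih]
    by_cases h1 : 50 ≤ PySem.List.pyGetD valores i 0 ∧
        PySem.List.pyGetD valores (i - 1) 0 < PySem.List.pyGetD valores i 0 ∧
        PySem.List.pyGetD valores (i + 1) 0 < PySem.List.pyGetD valores i 0
    · by_cases h2 : pvInnerA valores (valores.length : Int) i (PySem.List.pyGetD valores i 0)
          (PySem.List.pyRange 1 (d + 1) 1) = true
      · simp [h1, h2, List.append_assoc]
      · simp [h1, h2]
    · simp [h1]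

-- stack lemmas
lemma pvPop_suffix (valores : List Int) (vi : Int) (s : List Int) :
    (pvPop valores vi s).IsSuffix s := by
  induction s with
  | nil => exact List.nil_suffix
  | cons t s ih =>
    simp only [pvPop]
    split_ifs
    · exact ih.trans (List.suffix_cons t s)
    · exact List.suffix_refl _

lemma pvPop_kept (valores : List Int) (vi : Int) (s : List Int) (j : Int)
    (hj : j ∈ s) (hv : vi ≤ PySem.List.pyGetD valores j 0) : j ∈ pvPop valores vi s := by
  induction s with
  | nil => simp at hj
  | cons t s ih =>
    simp only [pvPop]
    split_ifs with h
    · rcases List.mem_cons.1 hj with rfl | hj'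
      · omega
      · exact ih hj'
    · exact hj

lemma pvPop_head (valores : List Int) (vi : Int) (s : List Int) (t : Int) (r : List Int)
    (h : pvPop valores vi s = t :: r) : vi ≤ PySem.List.pyGetD valores t 0 := by
  induction s with
  | nil => simp [pvPop] at h
  | cons a s ih =>
    simp only [pvPop] at h
    split_ifs at h with ha
    · exact ih h
    · cases h; omega
-- 'p is the nearest index j < i with valores[j] >= valores[i], or -1'
def pvPG (valores : List Int) (p i : Int) : Prop :=
  (p = -1 ∧ ∀ j : Int, 0 ≤ j → j < i → PySem.List.pyGetD valores j 0 < PySem.List.pyGetD valores i 0) ∨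
  (0 ≤ p ∧ p < i ∧ PySem.List.pyGetD valores i 0 ≤ PySem.List.pyGetD valores p 0 ∧
   ∀ j : Int, p < j → j < i → PySem.List.pyGetD valores j 0 < PySem.List.pyGetD valores i 0)

lemma pvLeft_inv (valores : List Int) (m : ℕ) :
    (((PySem.List.pyRange 0 (m : Int) 1).foldl (pvStepL valores) ([], [])).1.length = m) ∧
    List.Pairwise (· > ·) ((PySem.List.pyRange 0 (m : Int) 1).foldl (pvStepL valores) ([], [])).2 ∧
    (∀ j ∈ ((PySem.List.pyRange 0 (m : Int) 1).foldl (pvStepL valores) ([], [])).2, 0 ≤ j ∧ j < (m : Int)) ∧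
    (∀ j : Int, 0 ≤ j → j < (m : Int) →
      ∃ j' ∈ ((PySem.List.pyRange 0 (m : Int) 1).foldl (pvStepL valores) ([], [])).2,
        j ≤ j' ∧ PySem.List.pyGetD valores j 0 ≤ PySem.List.pyGetD valores j' 0) ∧
    (∀ t : ℕ, t < m →
      pvPG valores (((PySem.List.pyRange 0 (m : Int) 1).foldl (pvStepL valores) ([], [])).1.getD t 0) (t : Int)) := by
  induction m with
  | zero =>
    rw [PySem.List.pyRange_one_eq_nil (by omega)]
    refine ⟨rfl, by simp, by simp, by omega, by omega⟩
  | succ m ih =>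
    have hsplit : PySem.List.pyRange 0 ((m + 1 : ℕ) : Int) 1
        = PySem.List.pyRange 0 (m : Int) 1 ++ [(m : Int)] := by
      push_cast
      exact PySem.List.pyRange_one_succ_right (by omega)
    rw [hsplit, List.foldl_append, List.foldl_cons, List.foldl_nil]
    obtain ⟨ihlen, ihpw, ihbd, ihcov, ihpg⟩ := ih
    set st := (PySem.List.pyRange 0 (m : Int) 1).foldl (pvStepL valores) ([], []) with hst
    set vi := PySem.List.pyGetD valores (m : Int) 0 with hvi
    set s' := pvPop valores vi st.2 with hs'
    have hsub : ∀ j ∈ s', j ∈ st.2 := fun j hj => (pvPop_suffix valores vi st.2).sublist.mem hj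
    have hpw' : List.Pairwise (· > ·) s' := ihpw.sublist (pvPop_suffix valores vi st.2).sublist
    simp only [pvStepL]
    refine ⟨?_, ?_, ?_, ?_, ?_⟩
    · simp [ihlen]
    · -- pairwise of m :: s'
      refine List.pairwise_cons.2 ⟨fun j hj => ?_, hpw'⟩
      exact (ihbd j (hsub j hj)).2
    · -- bounds
      intro j hj
      rcases List.mem_cons.1 hj with rfl | hj'
      · constructor <;> omega
      · have := ihbd j (hsub j hj')
        push_cast
        omega
    · -- coverage
      intro j hj0 hjm
      by_cases hjeq : j = (m : Int)
      · exact ⟨(m : Int), List.mem_cons_self .., by omega, by rw [hjeq]⟩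
      · have hjm' : j < (m : Int) := by push_cast at hjm; omega
        obtain ⟨j', hj'mem, hjle, hvle⟩ := ihcov j hj0 hjm'
        by_cases hk : vi ≤ PySem.List.pyGetD valores j' 0
        · exact ⟨j', List.mem_cons_of_mem _ (pvPop_kept valores vi st.2 j' hj'mem hk), hjle, hvle⟩
        · refine ⟨(m : Int), List.mem_cons_self .., by omega, by rw [← hvi]; omega⟩
    · -- PG entries
      intro t ht
      by_cases htm : t < m
      · have hidx : (st.1 ++ [pvTopD s' (-1)]).getD t 0 = st.1.getD t 0 := by
          rw [List.getD_append _ _ _ _ (by omega)]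
        rw [hidx]
        exact ihpg t htm
      · have hteq : t = m := by omega
        subst hteq
        have hidx : (st.1 ++ [pvTopD s' (-1)]).getD t 0 = pvTopD s' (-1) := by
          rw [← ihlen]
          simp
        rw [hidx]
        cases hcase : s' with
        | nil =>
          left
          refine ⟨rfl, fun j hj0 hjt => ?_⟩
          by_contra hge
          push_neg at hge
          obtain ⟨j', hj'mem, _, hvle⟩ := ihcov j hj0 hjt
          have : j' ∈ s' := pvPop_kept valores vi st.2 j' hj'mem (le_trans hge hvle)
          rw [hcase] at this
          simp at this
        | cons p r =>
          simp only [pvTopD]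
          right
          have hpmem : p ∈ st.2 := hsub p (by rw [hcase]; exact List.mem_cons_self ..)
          have hpbd := ihbd p hpmem
          have hptop := pvPop_head valores vi st.2 p r (by rw [← hcase, hs'])
          refine ⟨hpbd.1, hpbd.2, hptop, fun j hjp hjt => ?_⟩
          by_contra hge
          push_neg at hge
          obtain ⟨j', hj'mem, hjle, hvle⟩ := ihcov j (by omega) hjt
          have hkept : j' ∈ s' := pvPop_kept valores vi st.2 j' hj'mem (le_trans hge hvle)
          rw [hcase] at hkept
          rcases List.mem_cons.1 hkept with rfl | hj'r
          · omega
          · have := (List.pairwise_cons.1 (hcase ▸ hpw')).1 j' hj'r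
            omega

-- 'p is the nearest index j > i with valores[j] >= valores[i], or n'
def pvNG (valores : List Int) (p i : Int) : Prop :=
  (p = (valores.length : Int) ∧ ∀ j : Int, i < j → j < (valores.length : Int) →
     PySem.List.pyGetD valores j 0 < PySem.List.pyGetD valores i 0) ∨
  (i < p ∧ p < (valores.length : Int) ∧ PySem.List.pyGetD valores i 0 ≤ PySem.List.pyGetD valores p 0 ∧
   ∀ j : Int, i < j → j < p → PySem.List.pyGetD valores j 0 < PySem.List.pyGetD valores i 0)

lemma pvRight_inv (valores : List Int) (c : ℕ) (hc : c ≤ valores.length) :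
    (((PySem.List.pyRange ((valores.length : Int) - 1) ((valores.length : Int) - 1 - (c : Int)) (-1)).foldl (pvStepR valores) ([], [])).1.length = c) ∧
    List.Pairwise (· < ·) ((PySem.List.pyRange ((valores.length : Int) - 1) ((valores.length : Int) - 1 - (c : Int)) (-1)).foldl (pvStepR valores) ([], [])).2 ∧
    (∀ j ∈ ((PySem.List.pyRange ((valores.length : Int) - 1) ((valores.length : Int) - 1 - (c : Int)) (-1)).foldl (pvStepR valores) ([], [])).2,
       (valores.length : Int) - (c : Int) ≤ j ∧ j < (valores.length : Int)) ∧
    (∀ j : Int, (valores.length : Int) - (c : Int) ≤ j → j < (valores.length : Int) →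
      ∃ j' ∈ ((PySem.List.pyRange ((valores.length : Int) - 1) ((valores.length : Int) - 1 - (c : Int)) (-1)).foldl (pvStepR valores) ([], [])).2,
        j' ≤ j ∧ PySem.List.pyGetD valores j 0 ≤ PySem.List.pyGetD valores j' 0) ∧
    (∀ t : ℕ, t < c →
      pvNG valores (((PySem.List.pyRange ((valores.length : Int) - 1) ((valores.length : Int) - 1 - (c : Int)) (-1)).foldl (pvStepR valores) ([], [])).1.getD t 0)
        ((valores.length : Int) - 1 - (t : Int))) := by
  induction c with
  | zero =>
    rw [PySem.List.pyRange_neg_one_eq_nil (by omega)]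
    refine ⟨rfl, by simp, by simp, by omega, by omega⟩
  | succ c ih =>
    obtain ⟨ihlen, ihpw, ihbd, ihcov, ihpg⟩ := ih (by omega)
    have hsplit : PySem.List.pyRange ((valores.length : Int) - 1) ((valores.length : Int) - 1 - ((c + 1 : ℕ) : Int)) (-1)
        = PySem.List.pyRange ((valores.length : Int) - 1) ((valores.length : Int) - 1 - (c : Int)) (-1)
          ++ [(valores.length : Int) - 1 - (c : Int)] := by
      rw [PySem.List.pyRange_neg_one_eq_reverse, PySem.List.pyRange_neg_one_eq_reverse]
      have h1 : (valores.length : Int) - 1 - ((c + 1 : ℕ) : Int) + 1 = (valores.length : Int) - 1 - (c : Int) := by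
        push_cast; ring
      have h2 : (valores.length : Int) - 1 + 1 = (valores.length : Int) := by ring
      rw [h1, h2]
      rw [PySem.List.pyRange_one_cons (by omega)]
      rw [List.reverse_cons]
    rw [hsplit, List.foldl_append, List.foldl_cons, List.foldl_nil]
    set q : Int := (valores.length : Int) - 1 - (c : Int) with hq
    set st := (PySem.List.pyRange ((valores.length : Int) - 1) ((valores.length : Int) - 1 - (c : Int)) (-1)).foldl (pvStepR valores) ([], []) with hst
    set vi := PySem.List.pyGetD valores q 0 with hvi
    set s' := pvPop valores vi st.2 with hs'
    have hsub : ∀ j ∈ s', j ∈ st.2 := fun j hj => (pvPop_suffix valores vi st.2).sublist.mem hj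
    have hpw' : List.Pairwise (· < ·) s' := ihpw.sublist (pvPop_suffix valores vi st.2).sublist
    simp only [pvStepR]
    refine ⟨?_, ?_, ?_, ?_, ?_⟩
    · simp [ihlen]
    · refine List.pairwise_cons.2 ⟨fun j hj => ?_, hpw'⟩
      have := ihbd j (hsub j hj)
      omega
    · intro j hj
      rcases List.mem_cons.1 hj with rfl | hj'
      · push_cast; omega
      · have := ihbd j (hsub j hj')
        push_cast
        omega
    · intro j hj0 hjm
      by_cases hjeq : j = q
      · exact ⟨q, List.mem_cons_self .., by omega, by rw [hjeq]⟩
      · have hjm' : (valores.length : Int) - (c : Int) ≤ j := by push_cast at hj0; omega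
        obtain ⟨j', hj'mem, hjle, hvle⟩ := ihcov j hjm' hjm
        by_cases hk : vi ≤ PySem.List.pyGetD valores j' 0
        · exact ⟨j', List.mem_cons_of_mem _ (pvPop_kept valores vi st.2 j' hj'mem hk), hjle, hvle⟩
        · refine ⟨q, List.mem_cons_self .., by omega, by omega⟩
    · intro t ht
      by_cases htm : t < c
      · have hidx : (st.1 ++ [pvTopD s' (valores.length : Int)]).getD t 0 = st.1.getD t 0 := by
          rw [List.getD_append _ _ _ _ (by omega)]
        rw [hidx]
        exact ihpg t htm
      · have hteq : t = c := by omega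
        subst hteq
        have hidx : (st.1 ++ [pvTopD s' (valores.length : Int)]).getD t 0 = pvTopD s' (valores.length : Int) := by
          rw [← ihlen]
          simp
        rw [hidx]
        have hqt : (valores.length : Int) - 1 - (t : Int) = q := rfl
        rw [hqt]
        cases hcase : s' with
        | nil =>
          simp only [pvTopD]
          left
          refine ⟨rfl, fun j hj0 hjt => ?_⟩
          by_contra hge
          push_neg at hge
          obtain ⟨j', hj'mem, _, hvle⟩ := ihcov j (by omega) hjt
          have : j' ∈ s' := pvPop_kept valores vi st.2 j' hj'mem (le_trans hge hvle)
          rw [hcase] at this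
          simp at this
        | cons p r =>
          simp only [pvTopD]
          right
          have hpmem : p ∈ st.2 := hsub p (by rw [hcase]; exact List.mem_cons_self ..)
          have hpbd := ihbd p hpmem
          have hptop := pvPop_head valores vi st.2 p r (by rw [← hcase, hs'])
          refine ⟨by omega, by omega, hptop, fun j hjp hjt => ?_⟩
          by_contra hge
          push_neg at hge
          obtain ⟨j', hj'mem, hjle, hvle⟩ := ihcov j (by omega) (by omega)
          have hkept : j' ∈ s' := pvPop_kept valores vi st.2 j' hj'mem (le_trans hge hvle)
          rw [hcase] at hkept
          rcases List.mem_cons.1 hkept with rfl | hj'r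
          · omega
          · have := (List.pairwise_cons.1 (hcase ▸ hpw')).1 j' hj'r
            omega

lemma pvPrevGE_spec (valores : List Int) (i : Int) (h0 : 0 ≤ i) (h1 : i < (valores.length : Int)) :
    pvPG valores (PySem.List.pyGetD (pvPrevGE valores) i 0) i := by
  obtain ⟨hlen, _, _, _, hpg⟩ := pvLeft_inv valores valores.length
  have ht : i.toNat < valores.length := by omega
  have hmain := hpg i.toNat ht
  rw [Int.toNat_of_nonneg h0] at hmain
  have e1 : PySem.List.pyGetD (pvPrevGE valores) i 0 = (pvPrevGE valores)[i.toNat]'(by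
      unfold pvPrevGE; omega) := by
    refine PySem.List.pyGetD_eq_getElem _ 0 h0 ?_
    unfold pvPrevGE
    omega
  have e2 : ((PySem.List.pyRange 0 ((valores.length : ℕ) : Int) 1).foldl (pvStepL valores) ([], [])).1.getD i.toNat 0
      = (pvPrevGE valores)[i.toNat]'(by unfold pvPrevGE; omega) := by
    unfold pvPrevGE
    exact List.getD_eq_getElem _ _ (by omega)
  rw [e1, ← e2]
  exact hmain

lemma pvNextGE_spec (valores : List Int) (i : Int) (h0 : 0 ≤ i) (h1 : i < (valores.length : Int)) :
    pvNG valores (PySem.List.pyGetD (pvNextGE valores) i 0) i := by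
  obtain ⟨hlen, _, _, _, hpg⟩ := pvRight_inv valores valores.length le_rfl
  rw [show ((valores.length : Int) - 1 - ((valores.length : ℕ) : Int)) = -1 by push_cast; ring] at hlen hpg
  have hn : 1 ≤ valores.length := by omega
  have ht : valores.length - 1 - i.toNat < valores.length := by omega
  have hmain := hpg (valores.length - 1 - i.toNat) ht
  rw [show ((valores.length : Int) - 1 - ((valores.length - 1 - i.toNat : ℕ) : Int)) = i by omega] at hmain
  have hlenrev : (pvNextGE valores).length = valores.length := by
    unfold pvNextGE
    rw [List.length_reverse]
    exact hlen
  have e1 : PySem.List.pyGetD (pvNextGE valores) i 0 = (pvNextGE valores)[i.toNat]'(by omega) :=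
    PySem.List.pyGetD_eq_getElem _ 0 h0 (by omega)
  have e2 : (pvNextGE valores)[i.toNat]'(by omega)
      = (((PySem.List.pyRange ((valores.length : Int) - 1) (-1) (-1)).foldl (pvStepR valores) ([], [])).1)[valores.length - 1 - i.toNat]'(by omega) := by
    unfold pvNextGE
    rw [List.getElem_reverse]
    congr 1
    omega
  have e3 : (((PySem.List.pyRange ((valores.length : Int) - 1) (-1) (-1)).foldl (pvStepR valores) ([], [])).1).getD (valores.length - 1 - i.toNat) 0
      = (((PySem.List.pyRange ((valores.length : Int) - 1) (-1) (-1)).foldl (pvStepR valores) ([], [])).1)[valores.length - 1 - i.toNat]'(by omega) :=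
    List.getD_eq_getElem _ _ (by omega)
  rw [e1, e2, ← e3]
  exact hmain

lemma pvB_cond_iff (valores : List Int) (d i : Int) (h1 : 1 ≤ i) (h2 : i < (valores.length : Int) - 1) :
    (PySem.List.pyGetD (pvPrevGE valores) i 0 < max 0 (i - max d 1) ∧
     min ((valores.length : Int) - 1) (i + max d 1) < PySem.List.pyGetD (pvNextGE valores) i 0) ↔
    pvWin valores d i := by
  have hPG := pvPrevGE_spec valores i (by omega) (by omega)
  have hNG := pvNextGE_spec valores i (by omega) (by omega)
  constructor
  · rintro ⟨hp, hq⟩ j hj1 hjD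
    constructor
    · intro hij
      rcases hPG with ⟨hp1, hall⟩ | ⟨hp1, hp2, hp3, hall⟩
      · exact hall _ hij (by omega)
      · exact hall _ (by omega) (by omega)
    · intro hin
      rcases hNG with ⟨hq1, hall⟩ | ⟨hq1, hq2, hq3, hall⟩
      · exact hall _ (by omega) hin
      · exact hall _ (by omega) (by omega)
  · intro hw
    constructor
    · by_contra hge
      push_neg at hge
      rcases hPG with ⟨hp1, _⟩ | ⟨hp1, hp2, hp3, _⟩
      · omega
      · have := (hw (i - PySem.List.pyGetD (pvPrevGE valores) i 0) (by omega) (by omega)).1 (by omega)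
        rw [show i - (i - PySem.List.pyGetD (pvPrevGE valores) i 0) = PySem.List.pyGetD (pvPrevGE valores) i 0 by ring] at this
        omega
    · by_contra hge
      push_neg at hge
      rcases hNG with ⟨hq1, _⟩ | ⟨hq1, hq2, hq3, _⟩
      · omega
      · have := (hw (PySem.List.pyGetD (pvNextGE valores) i 0 - i) (by omega) (by omega)).2 (by omega)
        rw [show i + (PySem.List.pyGetD (pvNextGE valores) i 0 - i) = PySem.List.pyGetD (pvNextGE valores) i 0 by ring] at this
        omega

theorem pv_main_eq (valores : List Int) (d : Int) :
    encontrar_picos_verdadeiros valores d = encontrar_picos_verdadeiros_alt valores d := by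
  have hA := pvA_filterMap_aux valores d (PySem.List.pyRange 1 ((valores.length : Int) - 1) 1) []
  rw [List.nil_append] at hA
  unfold encontrar_picos_verdadeiros
  rw [hA]
  unfold encontrar_picos_verdadeiros_alt
  apply List.filterMap_congr
  intro i hi
  rw [PySem.List.mem_pyRange_one] at hi
  obtain ⟨h1, h2⟩ := hi
  by_cases hC : 50 ≤ PySem.List.pyGetD valores i 0 ∧ pvWin valores d i
  · rw [if_pos ((pvA_elem valores d i h1 h2).2 hC),
        if_pos ⟨hC.1, (pvB_cond_iff valores d i h1 h2).2 hC.2⟩]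
  · rw [if_neg (fun hc => hC ((pvA_elem valores d i h1 h2).1 hc)),
        if_neg (fun hc => hC ⟨hc.1, (pvB_cond_iff valores d i h1 h2).1 ⟨hc.2.1, hc.2.2⟩⟩)]

-- ===== VERDICT (by name: the statement is the Claim_ definition above) =====
theorem encontrar_picos_verdadeiros_spec : Claim_equal_encontrar_picos_verdadeiros := by
  intro valores distancia _
  unfold Spec_encontrar_picos_verdadeiros
  exact pv_main_eq valores distancia
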